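-- pv_equiv track=rewrite | github.com/fmzquant/backtest_python | fmz.py | g__Cross
-- ===== SOURCE A (Python) =====
-- def g__Cross ( arr1 , arr2 ) :
--  if len ( arr1 ) != len ( arr2 ) :
--   raise Exception ( "cross array length not equal" )
--  iIiI1 = 0
--  for ii in range ( len ( arr1 ) - 1 , - 1 , - 1 ) :
--   if arr1 [ ii ] is None or arr2 [ ii ] is None :
--    break
--   if arr1 [ ii ] < arr2 [ ii ] :
--    if iIiI1 > 0 :
--     break
--    iIiI1 -= 1
--   elif arr1 [ ii ] > arr2 [ ii ] :
--    if iIiI1 < 0 :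
--     break
--    iIiI1 += 1
--   else :
--    break
--  return iIiI1
--  if 41 - 41: OooOoo + OooOoo - OooOoo
-- ===== SOURCE B (Python) =====
-- def g__Cross(arr1, arr2):
--     if len(arr1) != len(arr2):
--         raise Exception("cross array length not equal")
--     # First pass: signs of the trailing comparable run, from the end.
--     signs = []
--     for a, b in zip(reversed(arr1), reversed(arr2)):
--         if a is None or b is None or a == b:
--             break
--         signs.append(1 if a > b else -1)
--     # Second pass: signed length of the leading constant run of signs.
--     if not signs:
--         return 0
--     d = signs[0]
--     n = 0
--     for s in signs:
--         if s != d: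
--             break
--         n += 1
--     return d * n
-- ===== Notes on version B (the rewrite author's own statement) =====
-- stated objective: alternative
-- what changed: Replaces the single backward index loop with stateful sign-consistency breaks by two passes: first build the list of comparison signs of the trailing comparable run, then take the leading constant run of that sign list and return direction times its length.
import Mathlib
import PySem

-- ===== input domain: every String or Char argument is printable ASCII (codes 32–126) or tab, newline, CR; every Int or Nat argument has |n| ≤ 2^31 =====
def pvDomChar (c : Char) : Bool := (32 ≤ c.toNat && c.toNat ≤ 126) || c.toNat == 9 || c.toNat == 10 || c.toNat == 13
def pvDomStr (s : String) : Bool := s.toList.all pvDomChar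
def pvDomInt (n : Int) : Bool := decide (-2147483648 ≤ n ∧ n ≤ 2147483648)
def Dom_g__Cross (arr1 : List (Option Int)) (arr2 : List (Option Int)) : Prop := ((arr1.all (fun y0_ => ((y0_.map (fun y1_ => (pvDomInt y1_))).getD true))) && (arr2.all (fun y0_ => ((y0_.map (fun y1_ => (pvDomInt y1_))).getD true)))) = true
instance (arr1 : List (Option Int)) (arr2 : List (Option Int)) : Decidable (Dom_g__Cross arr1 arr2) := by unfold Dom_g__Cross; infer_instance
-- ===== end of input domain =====

-- B replaces A's single backward index loop (with stateful sign-consistency breaks) by two passes: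
-- build the sign list of the trailing comparable run, then return direction times the leading constant run length.

-- ===== PORT A =====
-- A's backward index loop; the three `break`s return the current counter.
-- (the `_, _ => cnt` arm is Python's IndexError, unreachable for the in-range indices of the range)
def gA_loop (arr1 : List (Option Int)) (arr2 : List (Option Int)) : List Int → Int → Int
  | [], cnt => cnt
  | ii :: rest, cnt =>
    match PySem.List.pyGet? arr1 ii, PySem.List.pyGet? arr2 ii with
    | some a, some b =>
      match a, b with
      | none, _ => cnt
      | some _, none => cnt
      | some x, some y =>
        if x < y then (if cnt > 0 then cnt else gA_loop arr1 arr2 rest (cnt - 1))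
        else if x > y then (if cnt < 0 then cnt else gA_loop arr1 arr2 rest (cnt + 1))
        else cnt
    | _, _ => cnt

def g__Cross (arr1 : List (Option Int)) (arr2 : List (Option Int)) : Int :=
  gA_loop arr1 arr2 (PySem.List.pyRange ((arr1.length : Int) - 1) (-1) (-1)) 0

-- ===== PORT B =====
-- pass 1: signs of the trailing comparable run (walking zip(reversed, reversed), break at None/equal)
def gB_signs : List (Option Int × Option Int) → List Int
  | [] => []
  | (a, b) :: rest =>
    match a, b with
    | some x, some y => if x = y then [] else (if x > y then 1 else -1) :: gB_signs rest
    | _, _ => []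

-- pass 2: length of the leading run of entries equal to d (break at the first other sign)
def gB_count (d : Int) : List Int → Int
  | [] => 0
  | s :: rest => if s = d then gB_count d rest + 1 else 0

def g__Cross_alt (arr1 : List (Option Int)) (arr2 : List (Option Int)) : Int :=
  let signs := gB_signs (List.zip arr1.reverse arr2.reverse)
  match signs with
  | [] => 0
  | d :: _ => d * gB_count d signs

-- ===== PRECONDITION & SPEC =====
-- Pre_ excludes exactly the inputs of unequal length, where A raises Exception.
def Pre_g__Cross (arr1 : List (Option Int)) (arr2 : List (Option Int)) : Prop :=
  arr1.length = arr2.length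
instance (arr1 : List (Option Int)) (arr2 : List (Option Int)) : Decidable (Pre_g__Cross arr1 arr2) := by
  unfold Pre_g__Cross; infer_instance

def pvWitness_g__Cross : List (Option Int) × List (Option Int) := ([some 3, some 1], [some 2, some 0])

def Spec_g__Cross (arr1 : List (Option Int)) (arr2 : List (Option Int)) (out : Int) : Prop := out = g__Cross_alt arr1 arr2
instance (arr1 : List (Option Int)) (arr2 : List (Option Int)) (out : Int) : Decidable (Spec_g__Cross arr1 arr2 out) := by unfold Spec_g__Cross; infer_instance

-- ===== CLAIM (what is proved, stated in full; the proofs are below) =====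
def Claim_equal_g__Cross : Prop := ∀ (arr1 : List (Option Int)) (arr2 : List (Option Int)), Dom_g__Cross arr1 arr2 → Pre_g__Cross arr1 arr2 → Spec_g__Cross arr1 arr2 (g__Cross arr1 arr2)

-- ===== LEMMAS AND PROOFS =====

-- Reference recursion on the reversed zipped list, structurally A's loop body.
def pvRun (cnt : Int) : List (Option Int × Option Int) → Int
  | [] => cnt
  | (a, b) :: rest =>
    match a, b with
    | some x, some y =>
      if x < y then (if cnt > 0 then cnt else pvRun (cnt - 1) rest)
      else if x > y then (if cnt < 0 then cnt else pvRun (cnt + 1) rest)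
      else cnt
    | _, _ => cnt

theorem gA_loop_eq_pvRun (arr1 arr2 : List (Option Int)) (h : arr1.length = arr2.length)
    (m : Nat) (hm : m ≤ arr1.length) (cnt : Int) :
    gA_loop arr1 arr2 (PySem.List.pyRange ((m : Int) - 1) (-1) (-1)) cnt
      = pvRun cnt (List.zip (arr1.take m).reverse (arr2.take m).reverse) := by
  induction m generalizing cnt with
  | zero =>
      rw [PySem.List.pyRange_neg_one_eq_nil (by omega)]
      simp [gA_loop, pvRun]
  | succ k ih =>
      have hk1 : k < arr1.length := by omega
      have hk2 : k < arr2.length := by omega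
      have hcons : PySem.List.pyRange (((k + 1 : Nat) : Int) - 1) (-1) (-1)
          = (k : Int) :: PySem.List.pyRange ((k : Int) - 1) (-1) (-1) := by
        push_cast
        rw [show ((k : Int) + 1 - 1) = (k : Int) by ring]
        exact PySem.List.pyRange_neg_one_cons (by omega)
      have htz : List.zip (arr1.take (k+1)).reverse (arr2.take (k+1)).reverse
          = (arr1[k], arr2[k]) :: List.zip (arr1.take k).reverse (arr2.take k).reverse := by
        have hrev1 : (arr1.take (k+1)).reverse = arr1[k] :: (arr1.take k).reverse := by
          rw [List.take_add_one, List.getElem?_eq_getElem hk1]; simp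
        have hrev2 : (arr2.take (k+1)).reverse = arr2[k] :: (arr2.take k).reverse := by
          rw [List.take_add_one, List.getElem?_eq_getElem hk2]; simp
        rw [hrev1, hrev2, List.zip_cons_cons]
      rw [hcons, htz]
      show (match PySem.List.pyGet? arr1 (k : Int), PySem.List.pyGet? arr2 (k : Int) with
        | some a, some b =>
          match a, b with
          | none, _ => cnt
          | some _, none => cnt
          | some x, some y =>
            if x < y then (if cnt > 0 then cnt else gA_loop arr1 arr2 (PySem.List.pyRange ((k : Int) - 1) (-1) (-1)) (cnt - 1))
            else if x > y then (if cnt < 0 then cnt else gA_loop arr1 arr2 (PySem.List.pyRange ((k : Int) - 1) (-1) (-1)) (cnt + 1))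
            else cnt
        | _, _ => cnt) = _
      rw [PySem.List.pyGet?_natCast, PySem.List.pyGet?_natCast,
          List.getElem?_eq_getElem hk1, List.getElem?_eq_getElem hk2]
      cases h1 : arr1[k] with
      | none => simp [pvRun]
      | some x =>
        cases h2 : arr2[k] with
        | none => simp [pvRun]
        | some y =>
          simp only [pvRun]
          split_ifs <;> simp_all [ih (by omega)]

-- in the counting phase, a positive counter means: keep adding while the sign is +1
theorem pvRun_pos (zs : List (Option Int × Option Int)) (cnt : Int) (h : 0 < cnt) :
    pvRun cnt zs = cnt + gB_count 1 (gB_signs zs) := by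
  induction zs generalizing cnt with
  | nil => simp [pvRun, gB_signs, gB_count]
  | cons p rest ih =>
      obtain ⟨a, b⟩ := p
      cases a with
      | none => simp [pvRun, gB_signs, gB_count]
      | some x =>
        cases b with
        | none => simp [pvRun, gB_signs, gB_count]
        | some y =>
          rcases lt_trichotomy x y with hlt | heq | hgt
          · have hne : ¬ x = y := by omega
            simp only [pvRun, gB_signs]
            rw [if_pos hlt, if_pos h, if_neg hne, if_neg (by omega : ¬ x > y)]
            simp [gB_count]
          · simp [pvRun, gB_signs, gB_count, heq]
          · have hne : ¬ x = y := by omega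
            simp only [pvRun, gB_signs]
            rw [if_neg (by omega : ¬ x < y), if_pos (by omega : x > y),
              if_neg (by omega : ¬ cnt < 0), if_neg hne, if_pos (by omega : x > y),
              ih (cnt + 1) (by omega)]
            simp [gB_count]
            omega

theorem pvRun_neg (zs : List (Option Int × Option Int)) (cnt : Int) (h : cnt < 0) :
    pvRun cnt zs = cnt - gB_count (-1) (gB_signs zs) := by
  induction zs generalizing cnt with
  | nil => simp [pvRun, gB_signs, gB_count]
  | cons p rest ih =>
      obtain ⟨a, b⟩ := p
      cases a with
      | none => simp [pvRun, gB_signs, gB_count]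
      | some x =>
        cases b with
        | none => simp [pvRun, gB_signs, gB_count]
        | some y =>
          rcases lt_trichotomy x y with hlt | heq | hgt
          · have hne : ¬ x = y := by omega
            simp only [pvRun, gB_signs]
            rw [if_pos hlt, if_neg (by omega : ¬ cnt > 0), if_neg hne,
              if_neg (by omega : ¬ x > y), ih (cnt - 1) (by omega)]
            simp [gB_count]
            omega
          · simp [pvRun, gB_signs, gB_count, heq]
          · have hne : ¬ x = y := by omega
            simp only [pvRun, gB_signs]
            rw [if_neg (by omega : ¬ x < y), if_pos (by omega : x > y),
              if_pos h, if_neg hne, if_pos (by omega : x > y)]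
            simp [gB_count]

theorem pvRun_zero (zs : List (Option Int × Option Int)) :
    pvRun 0 zs = (match gB_signs zs with
      | [] => 0
      | d :: _ => d * gB_count d (gB_signs zs)) := by
  cases zs with
  | nil => simp [pvRun, gB_signs]
  | cons p rest =>
      obtain ⟨a, b⟩ := p
      cases a with
      | none => simp [pvRun, gB_signs]
      | some x =>
        cases b with
        | none => simp [pvRun, gB_signs]
        | some y =>
          rcases lt_trichotomy x y with hlt | heq | hgt
          · have hne : ¬ x = y := by omega
            simp only [pvRun, gB_signs]
            rw [if_pos hlt, if_neg (by omega : ¬ (0 : Int) > 0), if_neg hne,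
              if_neg (by omega : ¬ x > y), pvRun_neg rest (0 - 1) (by omega)]
            simp [gB_count]
            ring
          · simp [pvRun, gB_signs, heq]
          · have hne : ¬ x = y := by omega
            simp only [pvRun, gB_signs]
            rw [if_neg (by omega : ¬ x < y), if_pos (by omega : x > y),
              if_neg (by omega : ¬ (0 : Int) < 0), if_neg hne,
              if_pos (by omega : x > y), pvRun_pos rest (0 + 1) (by omega)]
            simp [gB_count]
            ring

-- ===== VERDICT (by name: the statement is the Claim_ definition above) =====
theorem g__Cross_spec : Claim_equal_g__Cross := by
  intro arr1 arr2 _ hpre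
  unfold Spec_g__Cross g__Cross g__Cross_alt
  have hlen : arr1.length = arr2.length := hpre
  have h := gA_loop_eq_pvRun arr1 arr2 hlen arr1.length le_rfl 0
  rw [List.take_length, show arr2.take arr1.length = arr2 from by rw [hlen, List.take_length]] at h
  rw [h, pvRun_zero]
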